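-- pv_equiv track=rewrite | github.com/shreeyapoojari29/michigan.py | py35.facebook.py | calc_similarity_scores
-- ===== SOURCE A (Python) =====
-- def num_in_common_between_lists(list1, list2):
--     return sum(1 for item in list1 if item in list2)
--
-- def init_matrix(n):
--     return [[0] * n for _ in range(n)]
--
-- def calc_similarity_scores(network):
--     n = len(network)
--     similarity_matrix = init_matrix(n)
--     for i in range(n):
--         for j in range(n):
--             if i != j:
--                 similarity_matrix[i][j] = num_in_common_between_lists(network[i], network[j])
--     return similarity_matrix
-- ===== SOURCE B (Python) =====
-- def calc_similarity_scores(network):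
--     n = len(network)
--     # inverted index: element value -> sorted list of network indices whose list contains it
--     index = {}
--     for j in range(n):
--         for x in set(network[j]):
--             index[x] = index.get(x, []) + [j]
--     matrix = [[0] * n for _ in range(n)]
--     for i in range(n):
--         for x in network[i]:
--             for j in index.get(x, []):
--                 if j != i:
--                     matrix[i][j] += 1
--     return matrix
-- ===== Notes on version B (the rewrite author's own statement) =====
-- stated objective: faster
-- what changed: Replaced the nested all-pairs counting with per-pair linear membership scans by an inverted index (element value -> list of network indices containing it) built once, then one scatter pass over each list's items that increments matrix[i][j] via the index, skipping j==i.
import Mathlib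
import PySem

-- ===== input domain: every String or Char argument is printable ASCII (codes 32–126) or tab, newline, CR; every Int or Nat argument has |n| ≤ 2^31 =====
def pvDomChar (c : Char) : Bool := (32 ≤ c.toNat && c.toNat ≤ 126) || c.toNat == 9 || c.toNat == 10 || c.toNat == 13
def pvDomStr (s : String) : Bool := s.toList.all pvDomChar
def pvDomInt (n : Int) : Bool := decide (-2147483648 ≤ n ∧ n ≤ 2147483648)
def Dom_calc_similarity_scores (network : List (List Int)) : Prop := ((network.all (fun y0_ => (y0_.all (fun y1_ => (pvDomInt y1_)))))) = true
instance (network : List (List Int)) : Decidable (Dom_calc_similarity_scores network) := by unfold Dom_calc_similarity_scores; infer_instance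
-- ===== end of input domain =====

-- B replaces A's all-pairs membership-scan counting with an inverted index built once
-- plus one scatter pass; same return value proved, objective: faster.

-- ===== PORT A =====
-- sum(1 for item in list1 if item in list2)
def numInCommon (list1 list2 : List Int) : Int :=
  list1.foldl (fun acc x => if list2.contains x then acc + 1 else acc) 0

-- [[0] * n for _ in range(n)]
def initMatrix (n : Int) : List (List Int) :=
  (PySem.List.pyRange 0 n 1).map (fun _ => List.replicate n.toNat (0 : Int))

def calc_similarity_scores (network : List (List Int)) : List (List Int) :=
  let n : Int := network.length
  let m0 := initMatrix n
  (PySem.List.pyRange 0 n 1).foldl (fun m i =>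
    (PySem.List.pyRange 0 n 1).foldl (fun m j =>
      if i ≠ j then
        PySem.List.pySetD m i
          (PySem.List.pySetD (PySem.List.pyGetD m i []) j
            (numInCommon (PySem.List.pyGetD network i []) (PySem.List.pyGetD network j [])))
      else m) m) m0

-- ===== PORT B =====
-- index[x] = index.get(x, []) + [j]  (dict update keyed by element value)
def buildIndex (network : List (List Int)) : PySem.Dict Int (List Int) :=
  (PySem.List.pyRange 0 (network.length : Int) 1).foldl (fun d j =>
    (PySem.Set.ofList (PySem.List.pyGetD network j [])).foldl
      (fun d x => d.modify x [] (fun l => l ++ [j])) d) PySem.Dict.empty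

-- matrix[i][j] += 1
def bumpEntry (m : List (List Int)) (i j : Int) : List (List Int) :=
  PySem.List.pySetD m i
    (PySem.List.pySetD (PySem.List.pyGetD m i []) j
      (PySem.List.pyGetD (PySem.List.pyGetD m i []) j 0 + 1))

def calc_similarity_scores_alt (network : List (List Int)) : List (List Int) :=
  let n : Int := network.length
  let index := buildIndex network
  let m0 := (PySem.List.pyRange 0 n 1).map (fun _ => List.replicate n.toNat (0 : Int))
  (PySem.List.pyRange 0 n 1).foldl (fun m i =>
    (PySem.List.pyGetD network i []).foldl (fun m x =>
      (index.getD x []).foldl (fun m j =>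
        if j ≠ i then bumpEntry m i j else m) m) m) m0

-- ===== PRECONDITION & SPEC =====
def Spec_calc_similarity_scores (network : List (List Int)) (out : List (List Int)) : Prop := out = calc_similarity_scores_alt network
instance (network : List (List Int)) (out : List (List Int)) : Decidable (Spec_calc_similarity_scores network out) := by unfold Spec_calc_similarity_scores; infer_instance

-- ===== CLAIM (what is proved, stated in full; the proofs are below) =====
def Claim_equal_calc_similarity_scores : Prop := ∀ (network : List (List Int)), Dom_calc_similarity_scores network → Spec_calc_similarity_scores network (calc_similarity_scores network)

-- ===== LEMMAS AND PROOFS =====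

-- entry-level reading of List.set
theorem getD_set_int (r : List Int) (k t : Nat) (v : Int) :
    ((r.set k v).getD t 0) = if t = k ∧ k < r.length then v else r.getD t 0 := by
  simp only [List.getD_eq_getElem?_getD, List.getElem?_set]
  by_cases hk : k = t
  · subst hk
    by_cases hl : k < r.length
    · simp [hl]
    · simp [hl, List.getElem?_eq_none (show r.length ≤ k by omega)]
  · have : ¬(t = k ∧ k < r.length) := fun h => hk h.1.symm
    simp [hk, this]

-- writing back the row just read is a no-op
theorem pySetD_pyGetD_self (m : List (List Int)) (i : Int) (hi : 0 ≤ i) :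
    PySem.List.pySetD m i (PySem.List.pyGetD m i []) = m := by
  by_cases h : i.toNat < m.length
  · rw [PySem.List.pySetD_of_nonneg _ _ hi,
      PySem.List.pyGetD_eq_getElem _ _ hi (by omega)]
    exact List.set_getElem_self h
  · rw [PySem.List.pySetD_of_nonneg _ _ hi]
    exact List.set_eq_of_length_le (by omega)

-- read-after-write of the same row
theorem pyGetD_pySetD_self (m : List (List Int)) (i : Int) (hi : 0 ≤ i)
    (h : i.toNat < m.length) (r : List Int) :
    PySem.List.pyGetD (PySem.List.pySetD m i r) i [] = r := by
  rw [PySem.List.pySetD_of_nonneg _ _ hi,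
    PySem.List.pyGetD_eq_getElem _ _ hi (by simp; omega)]
  simp [h]

-- a loop whose body only rewrites row i of the matrix is one row rewrite
theorem foldl_row_update {β : Type} (i : Int) (hi : 0 ≤ i) (P : β → Prop)
    [DecidablePred P] (g : β → List Int → List Int) (jl : List β) (m : List (List Int)) :
    jl.foldl (fun m j => if P j then PySem.List.pySetD m i (g j (PySem.List.pyGetD m i [])) else m) m
      = PySem.List.pySetD m i (jl.foldl (fun r j => if P j then g j r else r) (PySem.List.pyGetD m i [])) := by
  induction jl generalizing m with
  | nil => simp [pySetD_pyGetD_self m i hi]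
  | cons j jl ih =>
    simp only [List.foldl_cons]
    by_cases hP : P j
    · simp only [hP, if_pos]
      by_cases hlen : i.toNat < m.length
      · rw [ih]
        rw [pyGetD_pySetD_self m i hi hlen]
        rw [PySem.List.pySetD_of_nonneg _ _ hi, PySem.List.pySetD_of_nonneg _ _ hi,
          PySem.List.pySetD_of_nonneg _ _ hi, List.set_set]
      · have hnoop : ∀ v, PySem.List.pySetD m i v = m := fun v => by
          rw [PySem.List.pySetD_of_nonneg _ _ hi]
          exact List.set_eq_of_length_le (by omega)
        rw [hnoop, ih, hnoop, hnoop]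
    · simp only [hP, if_neg, not_false_iff, ih]

-- guarded pySetD row loops preserve the length
theorem foldl_set_length (P : Int → Prop) [DecidablePred P]
    (g : Int → List Int → Int) (jl : List Int) (r : List Int) :
    (jl.foldl (fun r j => if P j then PySem.List.pySetD r j (g j r) else r) r).length = r.length := by
  induction jl generalizing r with
  | nil => rfl
  | cons j jl ih =>
    simp only [List.foldl_cons]
    by_cases hP : P j
    · simp only [hP, if_pos, ih, PySem.List.length_pySetD]
    · simp only [hP, if_neg, not_false_iff, ih]

-- a fold of single-row rewrites over range(len(m0)) is a map over the rows
theorem foldl_pySetD_rows_gen (F : Int → List Int → List Int) (m0 : List (List Int))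
    (k : Nat) (hk : k ≤ m0.length) :
    (PySem.List.pyRange 0 (k : Int) 1).foldl
        (fun m i => PySem.List.pySetD m i (F i (PySem.List.pyGetD m i []))) m0
      = (List.range k).map (fun (i : Nat) => F (i : Int) (m0.getD i [])) ++ m0.drop k := by
  induction k with
  | zero => simp [PySem.List.pyRange_one_eq_nil (le_refl (0:Int))]
  | succ k ih =>
    have hk' : k ≤ m0.length := by omega
    have hcast : ((k+1 : Nat) : Int) = (k : Int) + 1 := by push_cast; ring
    rw [hcast, PySem.List.pyRange_one_succ_right (by positivity), List.foldl_append, ih hk']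
    simp only [List.foldl_cons, List.foldl_nil]
    set mK := (List.range k).map (fun (i : Nat) => F (i : Int) (m0.getD i [])) ++ m0.drop k with hmK
    have hlenmap : ((List.range k).map (fun (i : Nat) => F (i : Int) (m0.getD i []))).length = k := by simp
    have hlen : mK.length = m0.length := by simp [hmK]; omega
    have hkl : k < m0.length := by omega
    have hget : PySem.List.pyGetD mK (k : Int) [] = m0[k] := by
      rw [PySem.List.pyGetD_eq_getElem _ _ (by positivity) (by rw [hlen]; exact_mod_cast hkl)]
      simp only [Int.toNat_natCast, hmK]
      rw [List.getElem_append_right (by simp)]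
      simp
    have hset : ∀ v, PySem.List.pySetD mK (k : Int) v
        = (List.range k).map (fun (i : Nat) => F (i : Int) (m0.getD i [])) ++ v :: m0.drop (k+1) := by
      intro v
      rw [PySem.List.pySetD_of_nonneg _ _ (by positivity), hmK]
      rw [List.set_append_right _ _ (by omega)]
      simp only [hlenmap, Int.toNat_natCast, Nat.sub_self]
      rw [List.drop_eq_getElem_cons hkl]
      rfl
    rw [hset, hget, List.range_succ, List.map_append]
    simp [List.getElem?_eq_getElem hkl]

theorem foldl_pySetD_rows (F : Int → List Int → List Int) (m0 : List (List Int))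
    (N : Nat) (hN : m0.length = N) :
    (PySem.List.pyRange 0 (N : Int) 1).foldl
        (fun m i => PySem.List.pySetD m i (F i (PySem.List.pyGetD m i []))) m0
      = (List.range N).map (fun (i : Nat) => F (i : Int) (m0.getD i [])) := by
  subst hN
  simpa using foldl_pySetD_rows_gen F m0 m0.length (le_refl _)

-- A's inner loop, entry by entry
theorem rowA_getD (c : Int → Int) (i : Int) (r0 : List Int) (t : Nat) (ht : t < r0.length) (k : Nat) :
    ((PySem.List.pyRange 0 (k : Int) 1).foldl
        (fun r j => if i ≠ j then PySem.List.pySetD r j (c j) else r) r0).getD t 0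
      = if (t : Int) < (k : Int) ∧ i ≠ (t : Int) then c (t : Int) else r0.getD t 0 := by
  induction k with
  | zero => simp [PySem.List.pyRange_one_eq_nil (le_refl (0:Int))]
  | succ k ih =>
    have hcast : ((k+1 : Nat) : Int) = (k : Int) + 1 := by push_cast; ring
    rw [hcast, PySem.List.pyRange_one_succ_right (by positivity), List.foldl_append]
    simp only [List.foldl_cons, List.foldl_nil]
    set rK := (PySem.List.pyRange 0 (k : Int) 1).foldl
        (fun r j => if i ≠ j then PySem.List.pySetD r j (c j) else r) r0 with hrK
    have hlen : rK.length = r0.length := foldl_set_length (fun j => i ≠ j) (fun j _ => c j) _ r0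
    by_cases hik : i ≠ (k : Int)
    · rw [if_pos hik]
      rw [PySem.List.pySetD_of_nonneg _ _ (by positivity), getD_set_int]
      simp only [Int.toNat_natCast, hlen]
      by_cases htk : t = k
      · subst htk
        simp [ht, hik]
      · have : ¬(t = k ∧ k < r0.length) := fun h => htk h.1
        rw [if_neg this, ih]
        have h1 : ((t : Int) < (k:Int) + 1 ∧ i ≠ (t:Int)) ↔ ((t : Int) < (k:Int) ∧ i ≠ (t:Int)) := by
          constructor
          · rintro ⟨h2, h3⟩; exact ⟨by omega, h3⟩
          · rintro ⟨h2, h3⟩; exact ⟨by omega, h3⟩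
        rw [if_congr h1 rfl rfl]
    · push Not at hik
      rw [if_neg (by simp [hik])]
      rw [ih]
      by_cases htk : t = k
      · subst htk
        simp [hik]
      · have h1 : ((t : Int) < (k:Int) + 1 ∧ i ≠ (t:Int)) ↔ ((t : Int) < (k:Int) ∧ i ≠ (t:Int)) := by
          constructor
          · rintro ⟨h2, h3⟩; refine ⟨by omega, h3⟩
          · rintro ⟨h2, h3⟩; exact ⟨by omega, h3⟩
        rw [if_congr h1 rfl rfl]

-- B's scatter loop, entry by entry: each entry records a count
theorem rowBump_getD (i : Int) (J : List Int) (r : List Int) (t : Nat)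
    (ht : t < r.length) (hJ : ∀ j ∈ J, 0 ≤ j) :
    ((J.foldl (fun r j => if j ≠ i then
        PySem.List.pySetD r j (PySem.List.pyGetD r j 0 + 1) else r) r).getD t 0)
      = r.getD t 0 + if (t : Int) = i then 0 else (J.count (t : Int) : Int) := by
  induction J generalizing r with
  | nil => simp
  | cons j J ih =>
    have h0 : (0:Int) ≤ j := hJ j (by simp)
    have hJ' : ∀ j ∈ J, (0:Int) ≤ j := fun x hx => hJ x (by simp [hx])
    simp only [List.foldl_cons]
    by_cases hji : j ≠ i
    · rw [if_pos hji]
      set r' := PySem.List.pySetD r j (PySem.List.pyGetD r j 0 + 1) with hr'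
      have hlen : r'.length = r.length := PySem.List.length_pySetD _ _ _
      rw [ih r' (by omega) hJ']
      have hset : r'.getD t 0 = r.getD t 0 + if (t:Int) = j then 1 else 0 := by
        rw [hr', PySem.List.pySetD_of_nonneg _ _ h0, getD_set_int]
        by_cases htj : (t:Int) = j
        · have hjt : j.toNat = t := by omega
          have hj' : (j : Int) = ((j.toNat : Nat) : Int) := by omega
          rw [if_pos ⟨hjt.symm, by omega⟩, if_pos htj]
          rw [hj', PySem.List.pyGetD_natCast, hjt]
        · have : ¬(t = j.toNat ∧ j.toNat < r.length) := by
            rintro ⟨h1, _⟩; omega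
          rw [if_neg this, if_neg htj]; ring
      rw [hset]
      by_cases hti : (t : Int) = i
      · have hnt : ¬((t:Int) = j) := by rw [hti]; exact fun h => hji h.symm
        simp [hti, hnt]
        exact fun h => hji h.symm
      · rw [if_neg hti, if_neg hti, List.count_cons]
        by_cases htj : (t:Int) = j
        · simp [htj.symm]; push_cast; ring
        · have : ¬(j = (t:Int)) := fun h => htj h.symm
          simp [this, htj]
    · rw [if_neg hji]
      push Not at hji
      rw [ih r ht hJ']
      by_cases hti : (t : Int) = i
      · simp [hti]
      · rw [if_neg hti, if_neg hti, List.count_cons]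
        have : ¬(j = (t:Int)) := by rw [hji]; exact fun h => hti h.symm
        simp [this]

-- filtering a duplicate-free list for one value
theorem filter_beq_nodup (S : List Int) (hS : S.Nodup) (x : Int) :
    S.filter (fun y => y == x) = if x ∈ S then [x] else [] := by
  induction S with
  | nil => simp
  | cons a S ih =>
    have hS' : S.Nodup := hS.of_cons
    rw [List.filter_cons]
    by_cases hax : a = x
    · subst hax
      have hna : a ∉ S := (List.nodup_cons.mp hS).1
      simp [ih hS', hna]
    · have : ((fun y => y == x) a) = false := by simp [hax]
      simp only [this, Bool.false_eq_true, ih hS', List.mem_cons]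
      by_cases hxS : x ∈ S
      · simp [hxS]
      · simp [hxS]
        exact fun h => hax h.symm

-- one step of the index build appends j to the bucket of each element of set(network[j])
theorem index_inner_step (d : PySem.Dict Int (List Int)) (j : Int) (S : List Int)
    (hS : S.Nodup) (x : Int) :
    ((S.foldl (fun d x => d.modify x [] (fun l => l ++ [j])) d).getD x [])
      = d.getD x [] ++ (if x ∈ S then [j] else []) := by
  have h1 : S.foldl (fun d x => d.modify x [] (fun l => l ++ [j])) d
      = (S.map (fun x => (x, j))).foldl (fun d p => d.modify p.1 [] (fun l => l ++ [p.2])) d := by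
    rw [List.foldl_map]
  rw [h1, PySem.Dict.getD_foldl_modify_append]
  congr 1
  rw [List.filter_map]
  have : ((fun p : Int × Int => p.1 == x) ∘ (fun y : Int => (y, j))) = fun y => y == x := rfl
  rw [this, filter_beq_nodup S hS x]
  by_cases hxS : x ∈ S <;> simp [hxS]

-- the inverted index: bucket of x = the indices whose list contains x, in order
theorem index_getD (network : List (List Int)) (x : Int) :
    (buildIndex network).getD x []
      = (PySem.List.pyRange 0 (network.length : Int) 1).filter
          (fun j => (PySem.List.pyGetD network j []).contains x) := by
  suffices h : ∀ k : Nat,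
      ((PySem.List.pyRange 0 (k : Int) 1).foldl (fun d j =>
        (PySem.Set.ofList (PySem.List.pyGetD network j [])).foldl
          (fun d x => d.modify x [] (fun l => l ++ [j])) d) PySem.Dict.empty).getD x []
      = (PySem.List.pyRange 0 (k : Int) 1).filter
          (fun j => (PySem.List.pyGetD network j []).contains x) by
    exact h network.length
  intro k
  induction k with
  | zero => simp [PySem.List.pyRange_one_eq_nil (le_refl (0:Int)), PySem.Dict.getD_empty]
  | succ k ih =>
    have hcast : ((k+1 : Nat) : Int) = (k : Int) + 1 := by push_cast; ring
    rw [hcast, PySem.List.pyRange_one_succ_right (by positivity), List.foldl_append,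
      List.filter_append]
    simp only [List.foldl_cons, List.foldl_nil, List.filter_cons, List.filter_nil]
    rw [index_inner_step _ _ _ (PySem.Set.nodup_ofList _) x, ih]
    congr 1
    by_cases hmem : x ∈ PySem.List.pyGetD network (k : Int) []
    · rw [if_pos ((PySem.Set.mem_ofList _ _).mpr hmem)]
      have : x ∈ network[k]?.getD [] := by
        simpa [PySem.List.pyGetD_natCast, List.getD_eq_getElem?_getD] using hmem
      simp [this]
    · rw [if_neg (fun h => hmem ((PySem.Set.mem_ofList _ _).mp h))]
      have : x ∉ network[k]?.getD [] := by
        simpa [PySem.List.pyGetD_natCast, List.getD_eq_getElem?_getD] using hmem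
      simp [this]

theorem count_flatMap {α β : Type} [DecidableEq β] (l : List α) (g : α → List β) (a : β) :
    (l.flatMap g).count a = (l.map (fun x => (g x).count a)).sum := by
  induction l with
  | nil => simp
  | cons b l ih => simp [List.flatMap_cons, List.count_append, ih]

theorem sum_map_ite_nat {α : Type} (l : List α) (p : α → Bool) :
    (l.map (fun x => if p x then (1 : Nat) else 0)).sum = l.countP p := by
  induction l with
  | nil => simp
  | cons b l ih =>
    simp only [List.map_cons, List.sum_cons, ih, List.countP_cons]
    by_cases hb : p b <;> simp [hb] <;> omega

-- elements of every index bucket are nonnegative positions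
theorem index_bucket_nonneg (network : List (List Int)) (x j : Int)
    (h : j ∈ (buildIndex network).getD x []) : 0 ≤ j := by
  rw [index_getD] at h
  have := (List.mem_filter.mp h).1
  exact (PySem.List.mem_pyRange_one.mp this).1

-- the count of index j in the bucket of x is the membership indicator
theorem index_bucket_count (network : List (List Int)) (x : Int) (t : Nat)
    (ht : t < network.length) :
    ((buildIndex network).getD x []).count (t : Int)
      = if (PySem.List.pyGetD network (t : Int) []).contains x then 1 else 0 := by
  rw [index_getD]
  by_cases hp : (PySem.List.pyGetD network (t : Int) []).contains x
  · rw [if_pos hp]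
    refine List.count_eq_one_of_mem ((PySem.List.nodup_pyRange_one _ _).filter _) ?_
    exact List.mem_filter.mpr ⟨PySem.List.mem_pyRange_one.mpr ⟨by positivity, by exact_mod_cast ht⟩, hp⟩
  · rw [if_neg hp]
    refine List.count_eq_zero_of_not_mem ?_
    intro hmem
    exact hp (List.mem_filter.mp hmem).2

-- ===== VERDICT (by name: the statement is the Claim_ definition above) =====
theorem calc_similarity_scores_spec : Claim_equal_calc_similarity_scores := by
  unfold Claim_equal_calc_similarity_scores
  intro network _
  unfold Spec_calc_similarity_scores calc_similarity_scores calc_similarity_scores_alt initMatrix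
  set N : Nat := network.length with hN
  set m0 : List (List Int) := (PySem.List.pyRange 0 (N : Int) 1).map
      (fun _ => List.replicate (N : Int).toNat (0 : Int)) with hm0
  have hm0len : m0.length = N := by
    rw [hm0]; simp [PySem.List.length_pyRange_one]
  -- the A side collapses to a map of rows
  have hA : (PySem.List.pyRange 0 (N : Int) 1).foldl (fun m i =>
      (PySem.List.pyRange 0 (N : Int) 1).foldl (fun m j =>
        if i ≠ j then
          PySem.List.pySetD m i
            (PySem.List.pySetD (PySem.List.pyGetD m i []) j
              (numInCommon (PySem.List.pyGetD network i []) (PySem.List.pyGetD network j [])))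
        else m) m) m0
      = (List.range N).map (fun (i : Nat) =>
          (PySem.List.pyRange 0 (N : Int) 1).foldl (fun r j =>
            if (i : Int) ≠ j then PySem.List.pySetD r j
              (numInCommon (PySem.List.pyGetD network (i : Int) []) (PySem.List.pyGetD network j []))
            else r) (m0.getD i [])) := by
    rw [PySem.List.foldl_congr_mem _ _ (fun m i =>
        PySem.List.pySetD m i ((PySem.List.pyRange 0 (N : Int) 1).foldl (fun r j =>
          if i ≠ j then PySem.List.pySetD r j
            (numInCommon (PySem.List.pyGetD network i []) (PySem.List.pyGetD network j []))
          else r) (PySem.List.pyGetD m i []))) m0 ?_]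
    · exact foldl_pySetD_rows (fun i r => (PySem.List.pyRange 0 (N : Int) 1).foldl (fun r j =>
          if i ≠ j then PySem.List.pySetD r j
            (numInCommon (PySem.List.pyGetD network i []) (PySem.List.pyGetD network j []))
          else r) r) m0 N hm0len
    · intro m i hi
      have h0 : (0:Int) ≤ i := (PySem.List.mem_pyRange_one.mp hi).1
      exact foldl_row_update i h0 (fun j => i ≠ j)
        (fun j r => PySem.List.pySetD r j
          (numInCommon (PySem.List.pyGetD network i []) (PySem.List.pyGetD network j []))) _ m
  -- the B side collapses to a map of rows
  have hB : (PySem.List.pyRange 0 (N : Int) 1).foldl (fun m i =>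
      (PySem.List.pyGetD network i []).foldl (fun m x =>
        ((buildIndex network).getD x []).foldl (fun m j =>
          if j ≠ i then bumpEntry m i j else m) m) m) m0
      = (List.range N).map (fun (i : Nat) =>
          ((PySem.List.pyGetD network (i : Int) []).flatMap
              (fun x => (buildIndex network).getD x [])).foldl (fun r j =>
            if j ≠ (i : Int) then PySem.List.pySetD r j (PySem.List.pyGetD r j 0 + 1) else r)
            (m0.getD i [])) := by
    rw [PySem.List.foldl_congr_mem _ _ (fun m i =>
        PySem.List.pySetD m i (((PySem.List.pyGetD network i []).flatMap
            (fun x => (buildIndex network).getD x [])).foldl (fun r j =>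
          if j ≠ i then PySem.List.pySetD r j (PySem.List.pyGetD r j 0 + 1) else r)
          (PySem.List.pyGetD m i []))) m0 ?_]
    · exact foldl_pySetD_rows (fun i r => ((PySem.List.pyGetD network i []).flatMap
            (fun x => (buildIndex network).getD x [])).foldl (fun r j =>
          if j ≠ i then PySem.List.pySetD r j (PySem.List.pyGetD r j 0 + 1) else r) r) m0 N hm0len
    · intro m i hi
      have h0 : (0:Int) ≤ i := (PySem.List.mem_pyRange_one.mp hi).1
      rw [← List.foldl_flatMap]
      exact foldl_row_update i h0 (fun j => j ≠ i)
        (fun j r => PySem.List.pySetD r j (PySem.List.pyGetD r j 0 + 1)) _ m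
  simp only []
  rw [hA, hB]
  -- the rows agree
  apply List.map_congr_left
  intro i hi
  have hiN : i < N := List.mem_range.mp hi
  have hrow0 : m0.getD i [] = List.replicate N (0:Int) := by
    rw [hm0, List.getD_eq_getElem _ _ (by simpa [PySem.List.length_pyRange_one] using hiN)]
    simp
  rw [hrow0]
  set z : List Int := List.replicate N (0:Int) with hz
  have hzlen : z.length = N := by simp [hz]
  set J : List Int := (PySem.List.pyGetD network (i : Int) []).flatMap
      (fun x => (buildIndex network).getD x []) with hJdef
  have hJpos : ∀ j ∈ J, (0:Int) ≤ j := by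
    intro j hj
    rw [hJdef] at hj
    obtain ⟨x, _, hx2⟩ := List.mem_flatMap.mp hj
    exact index_bucket_nonneg network x j hx2
  have hlenA : ((PySem.List.pyRange 0 (N : Int) 1).foldl (fun r j =>
      if (i : Int) ≠ j then PySem.List.pySetD r j
        (numInCommon (PySem.List.pyGetD network (i : Int) []) (PySem.List.pyGetD network j []))
      else r) z).length = N := by
    rw [foldl_set_length (fun j => (i:Int) ≠ j) (fun j _ =>
      numInCommon (PySem.List.pyGetD network (i : Int) []) (PySem.List.pyGetD network j [])) _ z, hzlen]
  have hlenB : (J.foldl (fun r j =>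
      if j ≠ (i : Int) then PySem.List.pySetD r j (PySem.List.pyGetD r j 0 + 1) else r) z).length = N := by
    rw [foldl_set_length (fun j => j ≠ (i:Int)) (fun j r => PySem.List.pyGetD r j 0 + 1) J z, hzlen]
  apply List.ext_getElem (by rw [hlenA, hlenB])
  intro t ht1 ht2
  have htN : t < N := by omega
  have hgA := rowA_getD (fun j => numInCommon (PySem.List.pyGetD network (i : Int) [])
      (PySem.List.pyGetD network j [])) (i : Int) z t (by omega) N
  have hgB := rowBump_getD (i : Int) J z t (by omega) hJpos
  have hA' : (((PySem.List.pyRange 0 (N : Int) 1).foldl (fun r j =>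
      if (i : Int) ≠ j then PySem.List.pySetD r j
        (numInCommon (PySem.List.pyGetD network (i : Int) []) (PySem.List.pyGetD network j []))
      else r) z)).getD t 0
      = if (i : Nat) ≠ t then numInCommon (PySem.List.pyGetD network (i : Int) [])
          (PySem.List.pyGetD network (t : Int) []) else 0 := by
    rw [hgA]
    have hz0 : z.getD t 0 = 0 := by rw [hz]; simp [List.getD_eq_getElem?_getD, htN]
    by_cases hit : (i : Nat) ≠ t
    · have hcond : ((t:Int) < (N:Int) ∧ (i:Int) ≠ (t:Int)) :=
        ⟨by exact_mod_cast htN, fun h => hit (by exact_mod_cast h)⟩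
      rw [if_pos hcond, if_pos hit]
    · push Not at hit
      rw [if_neg (by simp [hit]), hz0, if_neg (by simp [hit])]
  have hcount : (i : Nat) ≠ t → (J.count ((t : Nat) : Int) : Int)
      = numInCommon (PySem.List.pyGetD network (i : Int) []) (PySem.List.pyGetD network (t : Int) []) := by
    intro _
    rw [hJdef, count_flatMap]
    have hmap : ((PySem.List.pyGetD network (i : Int) []).map
        (fun x => ((buildIndex network).getD x []).count ((t : Nat) : Int)))
        = ((PySem.List.pyGetD network (i : Int) []).map
          (fun x => if (PySem.List.pyGetD network (t : Int) []).contains x then 1 else 0)) := by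
      apply List.map_congr_left
      intro x _
      exact index_bucket_count network x t htN
    rw [hmap, sum_map_ite_nat]
    show ((_ : Nat) : Int) = _
    unfold numInCommon
    rw [PySem.List.foldl_if_add_one (fun x => (PySem.List.pyGetD network (t : Int) []).contains x)]
    ring
  have hB' : ((J.foldl (fun r j =>
      if j ≠ (i : Int) then PySem.List.pySetD r j (PySem.List.pyGetD r j 0 + 1) else r) z)).getD t 0
      = if (i : Nat) ≠ t then numInCommon (PySem.List.pyGetD network (i : Int) [])
          (PySem.List.pyGetD network (t : Int) []) else 0 := by
    rw [hgB]
    have hz0 : z.getD t 0 = 0 := by rw [hz]; simp [List.getD_eq_getElem?_getD, htN]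
    rw [hz0]
    by_cases hit : (i : Nat) ≠ t
    · rw [if_neg (fun h : ((t:Nat):Int) = (i:Int) => hit (by exact_mod_cast h.symm)), if_pos hit]
      rw [hcount hit]
      ring
    · push Not at hit
      rw [if_pos (by exact_mod_cast hit.symm), if_neg (by simp [hit])]
      ring
  have e1 : ∀ (l : List Int) (hl : l.length = N),
      l[t]'(by omega) = l.getD t 0 := by
    intro l hl
    rw [List.getD_eq_getElem _ _ (by omega)]
  rw [e1 _ hlenA, e1 _ hlenB, hA', hB']
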